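-- pv_equiv track=rewrite | github.com/anc891203/poker_prize_calculator | app.py | enforce_non_decreasing
-- ===== SOURCE A (Python) =====
-- from typing import List, Tuple
--
-- def enforce_non_decreasing(lengths: List[int]) -> List[int]:
--     """Merge from the end until every later group has >= players than the previous."""
--     i = len(lengths) - 1
--     while i > 0:
--         if lengths[i] < lengths[i - 1]:
--             lengths[i - 1] += lengths[i]
--             lengths.pop(i)
--         i -= 1
--     return lengths
-- ===== SOURCE B (Python) =====
-- from typing import List
--
-- def enforce_non_decreasing(lengths: List[int]) -> List[int]:
--     """Single right-to-left stack pass building a fresh result (no mid-list pops).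
--
--     Note: unlike the original, this does not mutate the input list;
--     equivalence is about the return value."""
--     res = []  # processed suffix, stored reversed (res[-1] is its leftmost element)
--     for x in reversed(lengths):
--         if res and res[-1] < x:
--             res[-1] += x
--         else:
--             res.append(x)
--     return res[::-1]
-- ===== Notes on version B (the rewrite author's own statement) =====
-- stated objective: alternative
-- what changed: Replaced the backward while-loop that pops merged elements out of the middle of the list with a single right-to-left pass that builds a fresh result, merging into the last element of a stack (no mid-list pops, input not mutated).
import Mathlib
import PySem

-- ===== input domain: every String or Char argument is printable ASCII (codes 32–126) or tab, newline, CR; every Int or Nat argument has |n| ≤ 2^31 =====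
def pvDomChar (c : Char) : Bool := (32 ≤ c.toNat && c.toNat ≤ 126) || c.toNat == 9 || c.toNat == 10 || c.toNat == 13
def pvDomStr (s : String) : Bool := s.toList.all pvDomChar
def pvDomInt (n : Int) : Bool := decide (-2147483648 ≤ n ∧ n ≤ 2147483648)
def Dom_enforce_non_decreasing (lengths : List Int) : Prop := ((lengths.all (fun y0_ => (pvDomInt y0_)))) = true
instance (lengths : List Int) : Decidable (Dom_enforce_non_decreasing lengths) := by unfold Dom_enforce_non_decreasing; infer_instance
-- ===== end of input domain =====

-- B replaces A's backward pop-in-the-middle while-loop by a single right-to-left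
-- stack pass building a fresh result (objective: alternative); A mutates its
-- argument in place, B does not — the equivalence proved is about the return value.


-- ===== PORT A =====
-- while i > 0: compare lengths[i] with lengths[i-1], merge-and-pop, i -= 1.
-- Indices i and i-1 are always in range on every state the loop reaches
-- (i starts at len-1 and a pop shortens the list together with i), so the
-- '.getD 0' defaults are never taken; Python's i = -1 on [] is the
-- non-running loop, matched by Nat subtraction 'length - 1 = 0'.
def enforce_loop : List Int → Nat → List Int
  | l, 0 => l
  | l, (i+1) =>
    let li := (PySem.List.pyGet? l ((i : Int) + 1)).getD 0   -- lengths[i]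
    let lp := (PySem.List.pyGet? l (i : Int)).getD 0         -- lengths[i-1]
    if li < lp then enforce_loop ((l.set i (lp + li)).eraseIdx (i+1)) i
    else enforce_loop l i

def enforce_non_decreasing (lengths : List Int) : List Int :=
  enforce_loop lengths (lengths.length - 1)

-- ===== PORT B =====
-- fold over reversed(lengths); the accumulator holds Python's 'res' reversed
-- (its head is res[-1]), so Python's final 'res[::-1]' is the accumulator itself.
def enforce_non_decreasing_alt (lengths : List Int) : List Int :=
  lengths.reverse.foldl (fun res x =>
    match res with
    | y :: ys => if y < x then (y + x) :: ys else x :: y :: ys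
    | [] => [x]) []

-- ===== PRECONDITION & SPEC =====
def Spec_enforce_non_decreasing (lengths : List Int) (out : List Int) : Prop := out = enforce_non_decreasing_alt lengths
instance (lengths : List Int) (out : List Int) : Decidable (Spec_enforce_non_decreasing lengths out) := by unfold Spec_enforce_non_decreasing; infer_instance

-- ===== CLAIM (what is proved, stated in full; the proofs are below) =====
def Claim_equal_enforce_non_decreasing : Prop := ∀ (lengths : List Int), Dom_enforce_non_decreasing lengths → Spec_enforce_non_decreasing lengths (enforce_non_decreasing lengths)

-- ===== LEMMAS AND PROOFS =====
def merge1 (x : Int) (s : List Int) : List Int :=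
  match s with
  | y :: ys => if y < x then (y + x) :: ys else x :: y :: ys
  | [] => [x]

theorem alt_eq_foldr (l : List Int) :
    enforce_non_decreasing_alt l = l.foldr merge1 [] := by
  unfold enforce_non_decreasing_alt
  rw [List.foldl_reverse]
  rfl

theorem set_append_len (ys rest : List Int) (x v : Int) :
    (ys ++ x :: rest).set ys.length v = ys ++ v :: rest := by
  induction ys with
  | nil => simp
  | cons a as ih => simp [ih]

theorem erase_after (ys : List Int) (a b : Int) (rest : List Int) :
    (ys ++ a :: b :: rest).eraseIdx (ys.length + 1) = ys ++ a :: rest := by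
  induction ys with
  | nil => simp [List.eraseIdx]
  | cons c cs ih => simpa [List.eraseIdx] using ih

theorem loop_append (xs : List Int) :
    ∀ (s : List Int), s ≠ [] →
      enforce_loop (xs ++ s) xs.length = xs.foldr merge1 s := by
  induction xs using List.reverseRecOn with
  | nil => intro s _; simp [enforce_loop]
  | append_singleton ys x ih =>
    intro s hs
    obtain ⟨y, ys', rfl⟩ := List.exists_cons_of_ne_nil hs
    have hlen : (ys ++ [x]).length = ys.length + 1 := by simp
    rw [hlen]
    rw [show (ys ++ [x]) ++ y :: ys' = ys ++ x :: y :: ys' by simp]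
    rw [enforce_loop]
    have h1 : (PySem.List.pyGet? (ys ++ x :: y :: ys') ((ys.length : Int) + 1)).getD 0 = y := by
      have : ((ys.length : Int) + 1) = ((ys ++ [x]).length : Int) := by simp
      rw [this, show ys ++ x :: y :: ys' = (ys ++ [x]) ++ y :: ys' by simp,
        PySem.List.pyGet?_append_length]
      rfl
    have h2 : (PySem.List.pyGet? (ys ++ x :: y :: ys') ((ys.length : Int))).getD 0 = x := by
      rw [PySem.List.pyGet?_append_length]; rfl
    rw [h1, h2]
    by_cases hlt : y < x
    · rw [if_pos hlt, set_append_len, erase_after, ih _ (by simp)]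
      have : (ys ++ [x]).foldr merge1 (y :: ys') = ys.foldr merge1 ((y + x) :: ys') := by
        rw [List.foldr_append]
        simp [merge1, hlt]
      rw [this, Int.add_comm x y]
    · rw [if_neg hlt, show ys ++ x :: y :: ys' = ys ++ (x :: y :: ys') from rfl,
        ih _ (by simp)]
      rw [List.foldr_append]
      simp [merge1, hlt]

-- ===== VERDICT (by name: the statement is the Claim_ definition above) =====
theorem enforce_non_decreasing_spec : Claim_equal_enforce_non_decreasing := by
  intro lengths _
  unfold Spec_enforce_non_decreasing enforce_non_decreasing
  rw [alt_eq_foldr]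
  induction lengths using List.reverseRecOn with
  | nil => simp [enforce_loop]
  | append_singleton ys x _ =>
    have hlen : (ys ++ [x]).length - 1 = ys.length := by simp
    rw [hlen, loop_append ys [x] (by simp), List.foldr_append]
    rfl
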